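-- pv_equiv track=rewrite | github.com/ericmerle3789/Collatz-Junction-Theorem | scripts/research/r18_ordering_bypass.py | N0_tuples_exact
-- ===== SOURCE A (Python) =====
-- import math
-- from itertools import combinations, product as iproduct
--
-- def compute_S(k):
--     """S = ceil(k * log2(3)), exact via integer comparison.
--     S is the minimal integer such that 2^S > 3^k."""
--     S = math.ceil(k * math.log2(3))
--     while (1 << S) <= 3**k:
--         S += 1
--     while S > 0 and (1 << (S - 1)) > 3**k:
--         S -= 1
--     return S
--
-- def compute_d(k):
--     """d(k) = 2^S - 3^k where S = compute_S(k)."""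
--     S = compute_S(k)
--     return (1 << S) - 3**k
--
-- def N0_tuples_exact(k):
--     """
--     Compute N_0^{tuples}(d) by brute force:
--     Count k-tuples (a_0,...,a_{k-1}) in {0,...,S-1}^k
--     with corrSum = sum c_j * 2^{a_j} = 0 mod d.
--
--     WARNING: This is S^k, only feasible for very small k/S.
--     """
--     S = compute_S(k)
--     d = compute_d(k)
--     if S**k > 2_000_000:
--         return None
--     count = 0
--     for tup in iproduct(range(S), repeat=k):
--         cs = 0
--         for j in range(k):
--             cs = (cs + pow(3, k - 1 - j, d) * pow(2, tup[j], d)) % d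
--         if cs == 0:
--             count += 1
--     return count
-- ===== SOURCE B (Python) =====
-- import math
--
-- def compute_S(k):
--     S = math.ceil(k * math.log2(3))
--     while (1 << S) <= 3**k:
--         S += 1
--     while S > 0 and (1 << (S - 1)) > 3**k:
--         S -= 1
--     return S
--
-- def compute_d(k):
--     S = compute_S(k)
--     return (1 << S) - 3**k
--
-- def N0_tuples_exact(k):
--     """DP over residue classes mod d: one cyclic-convolution step per position,
--     instead of enumerating all S^k tuples."""
--     S = compute_S(k)
--     d = compute_d(k)
--     if S**k > 2_000_000:
--         return None
--     f = [1] + [0] * (d - 1)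
--     for j in range(k):
--         c = pow(3, k - 1 - j, d)
--         g = [0] * d
--         p = 1 % d
--         for a in range(S):
--             t = c * p % d
--             g = [g[s] + f[(s - t) % d] for s in range(d)]
--             p = p * 2 % d
--         f = g
--     return f[0]
-- ===== Notes on version B (the rewrite author's own statement) =====
-- stated objective: alternative
-- what changed: Replaces the brute-force enumeration of all S^k tuples by a dynamic program over residue classes mod d: one cyclic-convolution step per position, keeping a length-d vector of tuple counts per residue.
import Mathlib
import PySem

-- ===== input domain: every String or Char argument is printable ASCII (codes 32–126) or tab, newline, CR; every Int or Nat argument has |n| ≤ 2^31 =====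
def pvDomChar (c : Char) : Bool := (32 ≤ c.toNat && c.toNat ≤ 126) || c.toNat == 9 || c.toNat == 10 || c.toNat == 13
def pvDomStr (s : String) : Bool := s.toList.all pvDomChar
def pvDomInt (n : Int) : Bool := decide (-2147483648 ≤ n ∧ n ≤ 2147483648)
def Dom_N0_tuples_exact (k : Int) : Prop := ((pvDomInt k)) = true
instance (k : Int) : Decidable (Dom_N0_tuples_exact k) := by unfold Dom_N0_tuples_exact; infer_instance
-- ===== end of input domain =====

-- B replaces A's brute-force enumeration of all S^k tuples by a DP over residue
-- classes mod d (one cyclic-convolution step per position); objective: alternative algorithm.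

-- ===== PORT A =====
-- compute_S: the float ceil(k*log2 3) is only a starting guess that the two exact
-- integer while-loops correct; we start the up-loop at 0 with enough fuel (2k+2 steps
-- provably suffice since 2^(2k+2) > 3^k), which yields the same exact value, then run
-- the down-loop as in the source.
def computeSUp (t3 : Nat) : Nat → Nat → Nat
  | 0, S => S
  | fuel + 1, S => if 2 ^ S ≤ t3 then computeSUp t3 fuel (S + 1) else S

def computeSDown (t3 : Nat) : Nat → Nat
  | 0 => 0
  | S + 1 => if 2 ^ S > t3 then computeSDown t3 S else S + 1

def computeS (kn : Nat) : Nat := computeSDown (3 ^ kn) (computeSUp (3 ^ kn) (2 * kn + 2) 0)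

-- compute_d
def computeD (kn : Nat) : Nat := 2 ^ computeS kn - 3 ^ kn

-- inner loop 'for j in range(k): cs = (cs + pow(3,k-1-j,d)*pow(2,tup[j],d)) % d',
-- written as the structural recursion over the tuple (tuples have length k);
-- pow(b,e,d) is ported exactly as b^e % d.
def csLoop (kn d : Nat) : Nat → List Nat → Nat → Nat
  | _, [], cs => cs
  | j, a :: t, cs => csLoop kn d (j + 1) t ((cs + (3 ^ (kn - 1 - j) % d) * (2 ^ a % d)) % d)

-- itertools.product(range(S), repeat=k) in its lexicographic order (last coordinate fastest)
def tuplesList (S : Nat) : Nat → List (List Nat)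
  | 0 => [[]]
  | j + 1 => (tuplesList S j).flatMap (fun tup => (List.range S).map (fun a => tup ++ [a]))

def N0_tuples_exact (k : Int) : Option Int :=
  let kn := k.toNat          -- Pre_ guarantees 0 ≤ k (A raises ValueError for k < 0)
  let S := computeS kn
  let d := computeD kn
  if S ^ kn > 2000000 then none
  else some ((tuplesList S kn).foldl
    (fun count tup => if csLoop kn d 0 tup 0 = 0 then count + 1 else count) (0 : Int))

-- ===== PORT B =====
-- '[g[s] + f[(s - t) % d] for s in range(d)]'; since 0 ≤ t < d, Python's (s-t) % d
-- equals (s + (d - t)) % d, so the index stays in Nat exactly.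
def bStep (d t : Nat) (f g : List Nat) : List Nat :=
  (List.range d).map (fun s => g.getD s 0 + f.getD ((s + (d - t)) % d) 0)

-- 'for a in range(S): t = c*p % d; g = [...]; p = p*2 % d' with state (g, p)
def bALoop (S d c : Nat) (f : List Nat) : List Nat × Nat :=
  (List.range S).foldl
    (fun gp _ => (bStep d (c * gp.2 % d) f gp.1, gp.2 * 2 % d))
    (List.replicate d 0, 1 % d)

-- 'for j in range(k): c = pow(3,k-1-j,d); ... f = g'
def bJLoop (kn S d : Nat) : List Nat :=
  (List.range kn).foldl (fun f j => (bALoop S d (3 ^ (kn - 1 - j) % d) f).1)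
    (1 :: List.replicate (d - 1) 0)

def N0_tuples_exact_alt (k : Int) : Option Int :=
  let kn := k.toNat
  let S := computeS kn
  let d := computeD kn
  if S ^ kn > 2000000 then none
  else some (((bJLoop kn S d).getD 0 0 : Nat))   -- f[0]; 0 < d always, so in range

-- ===== PRECONDITION & SPEC =====
-- A raises ValueError ('negative shift count' in 1 << S) for k < 0; those inputs are excluded.
def Pre_N0_tuples_exact (k : Int) : Prop := 0 ≤ k
instance (k : Int) : Decidable (Pre_N0_tuples_exact k) := by unfold Pre_N0_tuples_exact; infer_instance
def pvWitness_N0_tuples_exact : Int := 3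

def Spec_N0_tuples_exact (k : Int) (out : Option Int) : Prop := out = N0_tuples_exact_alt k
instance (k : Int) (out : Option Int) : Decidable (Spec_N0_tuples_exact k out) := by unfold Spec_N0_tuples_exact; infer_instance

-- ===== CLAIM (what is proved, stated in full; the proofs are below) =====
def Claim_equal_N0_tuples_exact : Prop := ∀ (k : Int), Dom_N0_tuples_exact k → Pre_N0_tuples_exact k → Spec_N0_tuples_exact k (N0_tuples_exact k)

-- ===== LEMMAS AND PROOFS =====

-- the count of j-tuples whose partial corrSum is r (proof-only characterisation)
def specCnt (kn d S j r : Nat) : Nat :=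
  (tuplesList S j).countP (fun tup => decide (csLoop kn d 0 tup 0 = r))

theorem computeSUp_gt (t3 fuel S : Nat) (h : t3 < 2 ^ (S + fuel)) :
    t3 < 2 ^ computeSUp t3 fuel S := by
  induction fuel generalizing S with
  | zero => simpa [computeSUp] using h
  | succ n ih =>
    simp only [computeSUp]
    split
    · exact ih (S + 1) (by rw [show S + 1 + n = S + (n+1) by omega]; exact h)
    · omega

theorem computeSDown_gt (t3 S : Nat) (h : t3 < 2 ^ S) : t3 < 2 ^ computeSDown t3 S := by
  induction S with
  | zero => simpa [computeSDown] using h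
  | succ n ih =>
    simp only [computeSDown]
    split
    · exact ih (by omega)
    · exact h

theorem computeD_pos (kn : Nat) : 0 < computeD kn := by
  have h : (3:Nat) ^ kn < 2 ^ computeS kn := by
    apply computeSDown_gt
    apply computeSUp_gt
    have h1 : (3:Nat) ^ kn ≤ 4 ^ kn := Nat.pow_le_pow_left (by omega) kn
    have h2 : (4:Nat) ^ kn = 2 ^ (2 * kn) := by
      rw [show (4:Nat) = 2 ^ 2 by norm_num, ← pow_mul]
    have h3 : (2:Nat) ^ (2 * kn) < 2 ^ (2 * kn + 2) :=
      Nat.pow_lt_pow_right (by omega) (by omega)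
    simpa using lt_of_le_of_lt (h1.trans_eq h2) h3
  unfold computeD
  omega

theorem getD_range_map' {α : Type} (d s : Nat) (h : s < d) (f : Nat → α) (d0 : α) :
    ((List.range d).map f).getD s d0 = f s := by
  rw [List.getD_eq_getElem?_getD, List.getElem?_map, List.getElem?_range h]
  rfl

theorem tuplesList_length (S j : Nat) (tup : List Nat) (h : tup ∈ tuplesList S j) :
    tup.length = j := by
  induction j generalizing tup with
  | zero => simp [tuplesList] at h; simp [h]
  | succ n ih =>
    simp only [tuplesList, List.mem_flatMap, List.mem_map, List.mem_range] at h
    obtain ⟨t, ht, a, _, rfl⟩ := h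
    simp [ih t ht]

theorem csLoop_lt (kn d : Nat) (hd : 0 < d) (j : Nat) (t : List Nat) (cs : Nat)
    (hcs : cs < d) : csLoop kn d j t cs < d := by
  induction t generalizing j cs with
  | nil => simpa [csLoop] using hcs
  | cons a t ih => exact ih _ _ (Nat.mod_lt _ hd)

theorem csLoop_append (kn d : Nat) (j a : Nat) (t : List Nat) (cs : Nat) :
    csLoop kn d j (t ++ [a]) cs
      = (csLoop kn d j t cs + (3 ^ (kn - 1 - (j + t.length)) % d) * (2 ^ a % d)) % d := by
  induction t generalizing j cs with
  | nil => simp [csLoop]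
  | cons b t ih =>
    simp only [List.cons_append, csLoop, List.length_cons]
    rw [ih]
    rw [show j + 1 + t.length = j + (t.length + 1) from by omega]

theorem foldl_count_int {α : Type} (q : α → Prop) [DecidablePred q] (l : List α) (n : Int) :
    l.foldl (fun c x => if q x then c + 1 else c) n = n + l.countP (fun x => decide (q x)) := by
  induction l generalizing n with
  | nil => simp
  | cons a t ih =>
    simp only [List.foldl_cons, List.countP_cons, ih]
    by_cases h : q a <;> simp [h, add_assoc, add_comm]

theorem shift_iff (d cs X s : Nat) (hd : 0 < d) (hcs : cs < d) (hs : s < d) :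
    ((cs + X) % d = s) ↔ (cs = (s + (d - X % d)) % d) := by
  have ht : X % d < d := Nat.mod_lt _ hd
  rw [Nat.add_mod, Nat.mod_eq_of_lt hcs]
  set t := X % d with htdef
  constructor
  · intro h
    rcases Nat.lt_or_ge (cs + t) d with hlt | hge
    · rw [Nat.mod_eq_of_lt hlt] at h
      have e : s + (d - t) = cs + d := by omega
      rw [e, Nat.add_mod_right, Nat.mod_eq_of_lt hcs]
    · have h2 : (cs + t) % d = cs + t - d := by
        rw [Nat.mod_eq_sub_mod hge, Nat.mod_eq_of_lt (by omega)]
      rw [h2] at h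
      have e : s + (d - t) = cs := by omega
      rw [e, Nat.mod_eq_of_lt hcs]
  · intro h
    rcases Nat.lt_or_ge (s + (d - t)) d with hlt | hge
    · rw [Nat.mod_eq_of_lt hlt] at h
      have e : cs + t = s + d := by omega
      rw [e, Nat.add_mod_right, Nat.mod_eq_of_lt hs]
    · have h2 : (s + (d - t)) % d = s + (d - t) - d := by
        rw [Nat.mod_eq_sub_mod hge, Nat.mod_eq_of_lt (by omega)]
      rw [h2] at h
      have e : cs + t = s := by omega
      rw [e, Nat.mod_eq_of_lt hs]

theorem countP_last (kn d S j a s : Nat) (hd : 0 < d) (hs : s < d) :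
    (tuplesList S j).countP (fun tup => decide (csLoop kn d 0 (tup ++ [a]) 0 = s))
      = specCnt kn d S j ((s + (d - (3 ^ (kn - 1 - j) % d) * (2 ^ a % d) % d)) % d) := by
  unfold specCnt
  apply List.countP_congr
  intro tup htup
  have hlen := tuplesList_length S j tup htup
  rw [csLoop_append, hlen]
  simp only [decide_eq_true_eq, Nat.zero_add]
  exact shift_iff d (csLoop kn d 0 tup 0) _ s hd (csLoop_lt kn d hd 0 tup 0 hd) hs

theorem mulmod_left (x y d : Nat) : x % d * y % d = x * y % d := by
  conv_rhs => rw [Nat.mul_mod]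
  rw [Nat.mul_mod, Nat.mod_mod_of_dvd x dvd_rfl]

theorem replicate_eq_map_zero (d : Nat) :
    List.replicate d (0:Nat) = (List.range d).map (fun _ => 0) := by
  apply List.ext_getElem (by simp)
  intro i h1 h2
  simp

theorem bALoop_inv (kn S d : Nat) (hd : 0 < d) (j c : Nat) :
    bALoop S d c ((List.range d).map (fun r => specCnt kn d S j r))
      = ((List.range d).map (fun s =>
          ((List.range S).map (fun a =>
            specCnt kn d S j ((s + (d - c * (2 ^ a % d) % d)) % d))).sum), 2 ^ S % d) := by
  unfold bALoop
  suffices h : ∀ n : Nat,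
      (List.range n).foldl
        (fun gp _ => (bStep d (c * gp.2 % d) ((List.range d).map (fun r => specCnt kn d S j r)) gp.1, gp.2 * 2 % d))
        (List.replicate d 0, 1 % d)
      = ((List.range d).map (fun s =>
          ((List.range n).map (fun a =>
            specCnt kn d S j ((s + (d - c * (2 ^ a % d) % d)) % d))).sum), 2 ^ n % d) from h S
  intro n
  induction n with
  | zero =>
    simp only [List.range_zero, List.foldl_nil, List.map_nil, List.sum_nil, pow_zero,
      Prod.mk.injEq]
    exact ⟨replicate_eq_map_zero d, trivial⟩
  | succ n ih =>
    rw [List.range_succ, List.foldl_append, ih]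
    simp only [List.foldl_cons, List.foldl_nil, Prod.mk.injEq]
    refine ⟨?_, by rw [mulmod_left, ← pow_succ]⟩
    unfold bStep
    apply List.map_congr_left
    intro s hs
    rw [List.mem_range] at hs
    rw [getD_range_map' d s hs _ 0, getD_range_map' d _ (Nat.mod_lt _ hd) _ 0]
    rw [List.map_append, List.sum_append]
    simp

theorem countP_eq_sum_map {α : Type} (l : List α) (p : α → Bool) :
    l.countP p = (l.map (fun x => if p x then 1 else 0)).sum := by
  induction l with
  | nil => simp
  | cons a t ih =>
    by_cases h : p a
    · simp [h, ih, Nat.add_comm]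
    · simp [h, ih]

theorem sum_map_add {β : Type} (l : List β) (f g : β → Nat) :
    (l.map (fun y => f y + g y)).sum = (l.map f).sum + (l.map g).sum := by
  induction l with
  | nil => simp
  | cons a t ih => simp [ih]; omega

theorem sum_map_swap {α β : Type} (l1 : List α) (l2 : List β) (F : α → β → Nat) :
    (l1.map (fun x => (l2.map (F x)).sum)).sum
      = (l2.map (fun y => (l1.map (fun x => F x y)).sum)).sum := by
  induction l1 with
  | nil => simp
  | cons a t ih => simp only [List.map_cons, List.sum_cons, ih, sum_map_add]

theorem countP_flatMap' {α β : Type} (l : List α) (f : α → List β) (p : β → Bool) :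
    (l.flatMap f).countP p = (l.map (fun a => (f a).countP p)).sum := by
  induction l with
  | nil => simp
  | cons a t ih => simp [List.flatMap_cons, List.countP_append, ih]

theorem countP_map' {α β : Type} (l : List α) (f : α → β) (p : β → Bool) :
    (l.map f).countP p = l.countP (fun x => p (f x)) := by
  induction l with
  | nil => simp
  | cons a t ih => simp [List.countP_cons, ih]

theorem specCnt_succ (kn d S m s : Nat) (hd : 0 < d) (hs : s < d) :
    specCnt kn d S (m + 1) s
      = ((List.range S).map (fun a =>
          specCnt kn d S m ((s + (d - (3 ^ (kn - 1 - m) % d) * (2 ^ a % d) % d)) % d))).sum := by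
  conv_lhs => rw [specCnt, tuplesList]
  rw [countP_flatMap']
  calc ((tuplesList S m).map
          (fun tup => ((List.range S).map (fun a => tup ++ [a])).countP
            (fun t => decide (csLoop kn d 0 t 0 = s)))).sum
      = ((tuplesList S m).map (fun tup => ((List.range S).map
          (fun a => if decide (csLoop kn d 0 (tup ++ [a]) 0 = s) = true then 1 else 0)).sum)).sum := by
        apply congrArg
        apply List.map_congr_left
        intro tup _
        rw [countP_map', countP_eq_sum_map]
    _ = ((List.range S).map (fun a => ((tuplesList S m).map
          (fun tup => if decide (csLoop kn d 0 (tup ++ [a]) 0 = s) = true then 1 else 0)).sum)).sum :=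
        sum_map_swap _ _ _
    _ = _ := by
        apply congrArg
        apply List.map_congr_left
        intro a _
        rw [← countP_eq_sum_map]
        exact countP_last kn d S m a s hd hs

theorem bJLoop_inv (kn S d : Nat) (hd : 0 < d) :
    bJLoop kn S d = (List.range d).map (fun r => specCnt kn d S kn r) := by
  unfold bJLoop
  suffices h : ∀ m : Nat,
      (List.range m).foldl (fun f j => (bALoop S d (3 ^ (kn - 1 - j) % d) f).1)
        (1 :: List.replicate (d - 1) 0)
      = (List.range d).map (fun r => specCnt kn d S m r) from h kn
  intro m
  induction m with
  | zero =>
    simp only [List.range_zero, List.foldl_nil]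
    apply List.ext_getElem (by simp; omega)
    intro i h1 h2
    simp only [List.getElem_map, List.getElem_range]
    unfold specCnt tuplesList
    rcases i with _ | i
    · simp [csLoop]
    · simp only [List.getElem_cons_succ, List.getElem_replicate]
      simp [csLoop]
  | succ m ih =>
    rw [List.range_succ, List.foldl_append, ih]
    simp only [List.foldl_cons, List.foldl_nil]
    rw [bALoop_inv kn S d hd m _]
    apply List.map_congr_left
    intro s hs
    rw [List.mem_range] at hs
    exact (specCnt_succ kn d S m s hd hs).symm

-- ===== VERDICT (by name: the statement is the Claim_ definition above) =====
theorem N0_tuples_exact_spec : Claim_equal_N0_tuples_exact := by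
  intro k _ _
  unfold Spec_N0_tuples_exact N0_tuples_exact N0_tuples_exact_alt
  simp only []
  set kn := k.toNat with hkn
  set S := computeS kn with hS
  set d := computeD kn with hd'
  have hd : 0 < d := computeD_pos kn
  by_cases hbig : S ^ kn > 2000000
  · simp [hbig]
  · simp only [hbig, ite_false]
    congr 1
    rw [foldl_count_int]
    rw [bJLoop_inv kn S d hd, getD_range_map' d 0 hd _ 0]
    unfold specCnt
    simp
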